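-- pv_equiv track=rewrite | github.com/jihoonie0407/Atlas-Optimizer | release/core/stagger.py | optimal_stagger_grid
-- ===== SOURCE A (Python) =====
-- import math
-- from typing import List, Tuple
--
-- def _next_pot(v):
--     """v 이상의 최소 Power of Two 반환"""
--     p = 1
--     while p < v:
--         p <<= 1
--     return p
--
-- def optimal_stagger_grid(num_cells: int, fw: int, fh: int) -> Tuple[int, int]:
--     """
--     셀 수와 프레임 크기를 고려하여 POT 텍스처 면적이 최소인 그리드 반환.
--
--     Args:
--         num_cells: 패킹할 셀 수
--         fw: 프레임 너비
--         fh: 프레임 높이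
--
--     Returns:
--         (rows, cols)
--     """
--     best_rows, best_cols = 1, num_cells
--     best_pot_area = float('inf')
--     best_max_dim = float('inf')
--     best_waste = num_cells
--
--     for r in range(1, num_cells + 1):
--         c = math.ceil(num_cells / r)
--         pot_w = _next_pot(fw * c)
--         pot_h = _next_pot(fh * r)
--         pot_area = pot_w * pot_h
--         max_dim = max(pot_w, pot_h)
--         waste = r * c - num_cells
--
--         # 1순위: POT 면적 최소, 2순위: 최대 변 길이 최소 (정사각형 선호), 3순위: 빈 셀 최소
--         if (pot_area < best_pot_area
--             or (pot_area == best_pot_area and max_dim < best_max_dim)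
--             or (pot_area == best_pot_area and max_dim == best_max_dim and waste < best_waste)):
--             best_pot_area = pot_area
--             best_max_dim = max_dim
--             best_rows, best_cols = r, c
--             best_waste = waste
--
--     return best_rows, best_cols
-- ===== SOURCE B (Python) =====
-- def _pot(v):
--     """Smallest power of two >= v (1 for v <= 1), via bit_length."""
--     return 1 << (v - 1).bit_length() if v > 1 else 1
--
--
-- def optimal_stagger_grid(num_cells, fw, fh):
--     # Same optimum as the row-by-row scan, but visits only the O(sqrt(n))
--     # distinct values of c = ceil(n/r): within a block of rows sharing the
--     # same column count, the smallest row count is always at least as good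
--     # on every tie-break key, so one candidate per block suffices.
--     best = (1, num_cells)
--     best_key = None  # (pot_area, max_dim, waste); None = not set yet
--     r = 1
--     while r <= num_cells:
--         c = -(-num_cells // r)  # ceil(num_cells / r)
--         pw = _pot(fw * c)
--         ph = _pot(fh * r)
--         key = (pw * ph, max(pw, ph), r * c - num_cells)
--         if best_key is None or key < best_key:
--             best_key = key
--             best = (r, c)
--         # last row count with this same c, then jump past the block
--         r_last = (num_cells - 1) // (c - 1) if c > 1 else num_cells
--         r = max(r_last, r) + 1
--     return best
-- ===== Notes on version B (the rewrite author's own statement) =====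
-- stated objective: faster
-- what changed: Instead of scanning every row count r = 1..n, B enumerates only the O(sqrt(n)) blocks of row counts that share the same column count c = ceil(n/r) and evaluates one candidate (the smallest r) per block, which is provably at least as good as the rest of its block on every tie-break key.
import Mathlib
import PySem

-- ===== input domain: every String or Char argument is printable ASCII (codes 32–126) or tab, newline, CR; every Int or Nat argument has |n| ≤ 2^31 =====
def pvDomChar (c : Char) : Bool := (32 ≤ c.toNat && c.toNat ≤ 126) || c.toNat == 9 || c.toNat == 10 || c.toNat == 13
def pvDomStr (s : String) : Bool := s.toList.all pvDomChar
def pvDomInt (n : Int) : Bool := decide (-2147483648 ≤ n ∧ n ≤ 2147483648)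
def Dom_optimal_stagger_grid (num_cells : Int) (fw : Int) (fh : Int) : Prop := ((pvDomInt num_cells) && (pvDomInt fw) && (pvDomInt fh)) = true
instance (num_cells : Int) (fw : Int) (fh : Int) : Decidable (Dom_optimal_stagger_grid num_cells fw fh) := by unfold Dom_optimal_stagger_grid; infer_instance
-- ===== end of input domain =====

-- B replaces A's scan over every row count 1..n by a jump over the O(√n) blocks of row
-- counts sharing the same column count c = ceil(n/r), taking the first row of each block
-- (measured faster, asymptotically: O(√n log n) vs O(n log n)).

-- ===== PORT A =====
-- `while p < v: p <<= 1`; the `p ≤ 0` branch is a totality guard only — _next_pot always starts at p = 1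
def nextPotGo (v : Int) (p : Int) : Int :=
  if p ≤ 0 then p
  else if p < v then nextPotGo v (2 * p) else p
termination_by (v - p).toNat
decreasing_by omega

def next_pot (v : Int) : Int := nextPotGo v 1

def optimal_stagger_grid (num_cells : Int) (fw : Int) (fh : Int) : Int × Int :=
  -- state = (best_rows, best_cols, best, best_waste) where best = some (best_pot_area, best_max_dim)
  -- and none models the initial float('inf') pair (every comparison against it succeeds)
  let final := (PySem.List.pyRange 1 (num_cells + 1) 1).foldl (fun s r =>
    match s with
    | (best_rows, best_cols, best, best_waste) =>
      let c := -(PySem.Int.floordiv (-num_cells) r)  -- math.ceil(num_cells / r); exact: |num_cells| ≤ 2^31 < 2^53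
      let pot_w := next_pot (fw * c)
      let pot_h := next_pot (fh * r)
      let pot_area := pot_w * pot_h
      let max_dim := max pot_w pot_h
      let waste := r * c - num_cells
      let upd := match best with
        | none => true
        | some (ba, bm) =>
          decide (pot_area < ba) || (decide (pot_area = ba) && decide (max_dim < bm))
            || (decide (pot_area = ba) && decide (max_dim = bm) && decide (waste < best_waste))
      if upd then (r, c, some (pot_area, max_dim), waste)
      else (best_rows, best_cols, best, best_waste))
    ((1 : Int), num_cells, (none : Option (Int × Int)), num_cells)
  (final.1, final.2.1)

-- ===== PORT B =====
-- `1 << (v - 1).bit_length() if v > 1 else 1`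
def pot (v : Int) : Int := if 1 < v then (1 : Int) <<< (PySem.Int.bitLength (v - 1)) else 1

-- Python's lexicographic `<` on the 3-tuples (pot_area, max_dim, waste)
def keyLt (k1 k2 : Int × Int × Int) : Bool :=
  decide (k1.1 < k2.1) ||
    (decide (k1.1 = k2.1) &&
      (decide (k1.2.1 < k2.2.1) || (decide (k1.2.1 = k2.2.1) && decide (k1.2.2 < k2.2.2))))

def staggerLoop (num_cells fw fh : Int) (r : Int) (best : Int × Int)
    (best_key : Option (Int × Int × Int)) : Int × Int :=
  if _h : r ≤ num_cells then
    let c := -(PySem.Int.floordiv (-num_cells) r)  -- -(-num_cells // r)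
    let pw := pot (fw * c)
    let ph := pot (fh * r)
    let key := (pw * ph, max pw ph, r * c - num_cells)
    let upd := match best_key with
      | none => true
      | some bk => keyLt key bk
    let best' := if upd then (r, c) else best
    let best_key' := if upd then some key else best_key
    let r_last := if 1 < c then PySem.Int.floordiv (num_cells - 1) (c - 1) else num_cells
    staggerLoop num_cells fw fh (max r_last r + 1) best' best_key'
  else best
termination_by (num_cells + 1 - r).toNat
decreasing_by
  have := le_max_right r_last r
  omega

def optimal_stagger_grid_alt (num_cells : Int) (fw : Int) (fh : Int) : Int × Int :=
  staggerLoop num_cells fw fh 1 (1, num_cells) none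

-- ===== PRECONDITION & SPEC =====
def Spec_optimal_stagger_grid (num_cells : Int) (fw : Int) (fh : Int) (out : Int × Int) : Prop := out = optimal_stagger_grid_alt num_cells fw fh
instance (num_cells : Int) (fw : Int) (fh : Int) (out : Int × Int) : Decidable (Spec_optimal_stagger_grid num_cells fw fh out) := by unfold Spec_optimal_stagger_grid; infer_instance

-- ===== CLAIM (what is proved, stated in full; the proofs are below) =====
def Claim_equal_optimal_stagger_grid : Prop := ∀ (num_cells : Int) (fw : Int) (fh : Int), Dom_optimal_stagger_grid num_cells fw fh → Spec_optimal_stagger_grid num_cells fw fh (optimal_stagger_grid num_cells fw fh)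

-- ===== LEMMAS AND PROOFS =====

-- ---- facts about pot / next_pot ----

lemma pot_of_le_one {v : Int} (h : v ≤ 1) : pot v = 1 := by
  simp [pot, not_lt.mpr h]

lemma pot_of_one_lt {v : Int} (h : 1 < v) :
    pot v = 2 ^ PySem.Int.bitLength (v - 1) := by
  simp [pot, h, Int.shiftLeft_eq]

lemma pot_char {v : Int} (h : 1 < v) :
    (2 : Int) ^ (PySem.Int.bitLength (v - 1) - 1) < v ∧ v ≤ 2 ^ PySem.Int.bitLength (v - 1) := by
  have hne : v - 1 ≠ 0 := by omega
  have h1 := PySem.Int.two_pow_bitLength_le (v - 1) hne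
  have h2 := PySem.Int.lt_two_pow_bitLength (v - 1)
  have habs : ((v - 1).natAbs : Int) = v - 1 := by omega
  constructor
  · have h1' : ((2 ^ (PySem.Int.bitLength (v - 1) - 1) : Nat) : Int) ≤ ((v - 1).natAbs : Int) :=
      Int.ofNat_le.mpr h1
    rw [habs] at h1'; push_cast at h1'; omega
  · have h2' : ((v - 1).natAbs : Int) < ((2 ^ PySem.Int.bitLength (v - 1) : Nat) : Int) :=
      Int.ofNat_lt.mpr h2
    rw [habs] at h2'; push_cast at h2'; omega

lemma one_le_pot (v : Int) : 1 ≤ pot v := by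
  by_cases h : 1 < v
  · rw [pot_of_one_lt h]; exact one_le_pow₀ (by norm_num)
  · rw [pot_of_le_one (by omega)]

lemma pot_le_two_pow {v : Int} {L : Nat} (hv : v ≤ 2 ^ L) : pot v ≤ 2 ^ L := by
  by_cases h : 1 < v
  · rw [pot_of_one_lt h]
    have h1 := (pot_char h).1
    apply pow_le_pow_right₀ (by norm_num : (1:Int) ≤ 2)
    by_contra hc
    have : (2:Int) ^ L ≤ 2 ^ (PySem.Int.bitLength (v - 1) - 1) :=
      pow_le_pow_right₀ (by norm_num) (by omega)
    omega
  · rw [pot_of_le_one (by omega)]; exact one_le_pow₀ (by norm_num)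

lemma pot_mono {v w : Int} (h : v ≤ w) : pot v ≤ pot w := by
  by_cases hw : 1 < w
  · rw [pot_of_one_lt hw]
    exact pot_le_two_pow (le_trans h (pot_char hw).2)
  · rw [pot_of_le_one (by omega), pot_of_le_one (by omega)]

-- next_pot (A's doubling loop) computes pot (B's bit_length formula)
lemma nextPotGo_pow {v : Int} {L : Nat} (hlo : (2:Int) ^ (L - 1) < v) (hhi : v ≤ 2 ^ L) :
    ∀ (d k : Nat), k + d = L → nextPotGo v (2 ^ k) = 2 ^ L := by
  intro d
  induction d with
  | zero =>
    intro k hk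
    have hkL : (2:Int) ^ k = 2 ^ L := by rw [(by omega : k = L)]
    rw [nextPotGo, hkL]
    have hpos : ¬ ((2:Int) ^ L ≤ 0) := by
      have := one_le_pow₀ (n := L) (by norm_num : (1:Int) ≤ 2); omega
    simp [hpos, not_lt.mpr hhi]
  | succ d ih =>
    intro k hk
    rw [nextPotGo]
    have hkL : k < L := by omega
    have hlt : (2:Int) ^ k < v := by
      have : (2:Int) ^ k ≤ 2 ^ (L - 1) := pow_le_pow_right₀ (by norm_num) (by omega)
      omega
    have hpos : ¬ ((2:Int) ^ k ≤ 0) := by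
      have := one_le_pow₀ (n := k) (by norm_num : (1:Int) ≤ 2); omega
    have h2 : 2 * (2:Int) ^ k = 2 ^ (k + 1) := by ring
    simp only [hpos, if_false, hlt, if_true, h2]
    exact ih (k + 1) (by omega)

lemma next_pot_eq_pot : next_pot = pot := by
  funext v
  by_cases h : 1 < v
  · have hc := pot_char h
    have : nextPotGo v (2 ^ 0) = 2 ^ PySem.Int.bitLength (v - 1) :=
      nextPotGo_pow hc.1 hc.2 (PySem.Int.bitLength (v - 1)) 0 (by omega)
    simpa [next_pot, pot_of_one_lt h] using this
  · rw [pot_of_le_one (by omega)]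
    rw [next_pot, nextPotGo]
    norm_num
    omega

-- ---- facts about keyLt ----

lemma keyLt_eq_pycond (a m w ba bm bw : Int) :
    keyLt (a, m, w) (ba, bm, bw)
      = (decide (a < ba) || (decide (a = ba) && decide (m < bm))
          || (decide (a = ba) && decide (m = bm) && decide (w < bw))) := by
  simp only [keyLt]
  by_cases h1 : a < ba <;> by_cases h2 : a = ba <;> by_cases h3 : m < bm <;>
    by_cases h4 : m = bm <;> by_cases h5 : w < bw <;> simp [h1, h2, h3, h4, h5]

lemma keyLt_irrefl (k : Int × Int × Int) : keyLt k k = false := by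
  obtain ⟨a, m, w⟩ := k
  simp [keyLt]

lemma keyLt_false_of (x y k : Int × Int × Int)
    (h1 : keyLt x y = true) (h2 : keyLt x k = false) : keyLt y k = false := by
  obtain ⟨a, m, w⟩ := x; obtain ⟨a', m', w'⟩ := y; obtain ⟨ka, km, kw⟩ := k
  simp only [keyLt, Bool.or_eq_true, Bool.and_eq_true, decide_eq_true_eq,
    Bool.or_eq_false_iff, Bool.and_eq_false_iff, decide_eq_false_iff_not, not_lt] at *
  omega

-- ---- ceiling-division block facts ----

lemma ceil_bounds {n r : Int} (hr : 0 < r) :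
    (-(PySem.Int.floordiv (-n) r) - 1) * r < n ∧ n ≤ -(PySem.Int.floordiv (-n) r) * r :=
  (PySem.Int.neg_floordiv_neg_eq_iff_of_pos hr).mp rfl

lemma ceil_pos {n r : Int} (hr : 0 < r) (hn : 0 < n) : 0 < -(PySem.Int.floordiv (-n) r) := by
  have h := (ceil_bounds (n := n) hr).2
  by_contra hc
  have : -(PySem.Int.floordiv (-n) r) * r ≤ 0 :=
    mul_nonpos_of_nonpos_of_nonneg (by omega) (by omega)
  omega

-- every r' in the block [r, r_last] has the same ceiling c
lemma ceil_block {n r r' c : Int} (hr : 0 < r) (hrr' : r ≤ r') (hn : 0 < n)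
    (hc : c = -(PySem.Int.floordiv (-n) r))
    (hlast : r' ≤ (if 1 < c then PySem.Int.floordiv (n - 1) (c - 1) else n)) :
    -(PySem.Int.floordiv (-n) r') = c := by
  have hr' : 0 < r' := by omega
  have hb := ceil_bounds (n := n) hr
  rw [← hc] at hb
  have hcpos : 0 < c := hc ▸ ceil_pos hr hn
  rw [PySem.Int.neg_floordiv_neg_eq_iff_of_pos hr']
  constructor
  · by_cases h1 : 1 < c
    · rw [if_pos h1] at hlast
      have := (PySem.Int.le_floordiv_iff_mul_le (a := n - 1) (b := c - 1) (by omega)).mp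
        (le_of_eq rfl)
      have h2 : r' * (c - 1) ≤ n - 1 :=
        (PySem.Int.le_floordiv_iff_mul_le (by omega)).mp hlast |>.trans_eq rfl
      nlinarith
    · have hc1 : c = 1 := by omega
      simp [hc1]; omega
  · calc n ≤ c * r := hb.2
      _ ≤ c * r' := by
        exact mul_le_mul_of_nonneg_left hrr' (by omega)

-- ---- the shared candidate key and A's fold step, written with pot ----

def candKey (n fw fh r : Int) : Int × Int × Int :=
  let c := -(PySem.Int.floordiv (-n) r)
  let pw := pot (fw * c)
  let ph := pot (fh * r)
  (pw * ph, max pw ph, r * c - n)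

-- strictly worse keys within a block: later rows of the same block have strictly worse keys
lemma candKey_strict {n fw fh r r' : Int} (hr : 0 < r) (hlt : r < r') (hn : 0 < n)
    (hsame : -(PySem.Int.floordiv (-n) r') = -(PySem.Int.floordiv (-n) r)) :
    keyLt (candKey n fw fh r) (candKey n fw fh r') = true := by
  set c := -(PySem.Int.floordiv (-n) r) with hc
  have hcpos : 0 < c := ceil_pos hr hn
  have hph : pot (fh * r) ≤ pot (fh * r') := by
    by_cases hfh : 0 < fh
    · exact pot_mono (by nlinarith)
    · rw [pot_of_le_one (by nlinarith), pot_of_le_one (by nlinarith)]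
  have hpw : 0 < pot (fw * c) := one_le_pot _
  simp only [candKey, hsame, ← hc]
  rcases lt_or_eq_of_le hph with hph' | hph'
  · -- pot_h strictly grows ⇒ pot_area strictly grows
    have : pot (fw * c) * pot (fh * r) < pot (fw * c) * pot (fh * r') :=
      mul_lt_mul_of_pos_left hph' hpw
    simp [keyLt, this]
  · -- same pot sizes ⇒ waste strictly grows
    have hw : r * c - n < r' * c - n := by nlinarith
    simp [keyLt, hph', hw]

-- state correspondence: B carries A's (best, best_waste) as one optional key triple
def bkey (s : Int × Int × Option (Int × Int) × Int) : Option (Int × Int × Int) :=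
  s.2.2.1.map (fun am => (am.1, am.2, s.2.2.2))

def stepA (n fw fh : Int) (s : Int × Int × Option (Int × Int) × Int) (r : Int) :
    Int × Int × Option (Int × Int) × Int :=
  match s with
  | (best_rows, best_cols, best, best_waste) =>
    let c := -(PySem.Int.floordiv (-n) r)
    let pot_w := pot (fw * c)
    let pot_h := pot (fh * r)
    let pot_area := pot_w * pot_h
    let max_dim := max pot_w pot_h
    let waste := r * c - n
    let upd := match best with
      | none => true
      | some (ba, bm) =>
        decide (pot_area < ba) || (decide (pot_area = ba) && decide (max_dim < bm))
          || (decide (pot_area = ba) && decide (max_dim = bm) && decide (waste < best_waste))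
    if upd then (r, c, some (pot_area, max_dim), waste)
    else (best_rows, best_cols, best, best_waste)

lemma optimal_stagger_grid_eq_fold (n fw fh : Int) :
    optimal_stagger_grid n fw fh =
      (let final := (PySem.List.pyRange 1 (n + 1) 1).foldl (stepA n fw fh)
        ((1 : Int), n, (none : Option (Int × Int)), n)
       (final.1, final.2.1)) := by
  simp only [optimal_stagger_grid, next_pot_eq_pot]
  rfl

-- A's update test is B's keyLt, component-wise
lemma pycond_eq_keyLt (a m w ba bm bw : Int) :
    (decide (a < ba) || (decide (a = ba) && decide (m < bm))
        || (decide (a = ba) && decide (m = bm) && decide (w < bw)))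
      = keyLt (a, m, w) (ba, bm, bw) := (keyLt_eq_pycond a m w ba bm bw).symm

lemma foldl_fixed_of_mem {α β : Type} (f : α → β → α) (s : α) (l : List β)
    (h : ∀ x ∈ l, f s x = s) : l.foldl f s = s := by
  induction l with
  | nil => rfl
  | cons y t ih =>
    simp only [List.foldl_cons, h y (by simp)]
    exact ih (fun x hx => h x (by simp [hx]))

-- B's update test, on the carried optional key
def updO (bk : Option (Int × Int × Int)) (key : Int × Int × Int) : Bool :=
  match bk with
  | none => true
  | some b => keyLt key b

lemma stepA_fst (n fw fh r : Int) (s : Int × Int × Option (Int × Int) × Int) :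
    ((stepA n fw fh s r).1, (stepA n fw fh s r).2.1)
      = (if updO (bkey s) (candKey n fw fh r) then (r, -(PySem.Int.floordiv (-n) r))
         else (s.1, s.2.1)) := by
  obtain ⟨br, bc, best, bw⟩ := s
  cases best with
  | none => simp [stepA, updO, bkey]
  | some am =>
    obtain ⟨ba, bm⟩ := am
    simp only [stepA, updO, bkey, Option.map_some, pycond_eq_keyLt, candKey]
    split <;> rfl

lemma stepA_bkey (n fw fh r : Int) (s : Int × Int × Option (Int × Int) × Int) :
    bkey (stepA n fw fh s r)
      = (if updO (bkey s) (candKey n fw fh r) then some (candKey n fw fh r) else bkey s) := by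
  obtain ⟨br, bc, best, bw⟩ := s
  cases best with
  | none => simp [stepA, updO, bkey, candKey]
  | some am =>
    obtain ⟨ba, bm⟩ := am
    simp only [stepA, updO, bkey, Option.map_some, pycond_eq_keyLt, candKey]
    split <;> rfl

lemma stepA_key_not_lt (n fw fh r : Int) (s : Int × Int × Option (Int × Int) × Int)
    (k : Int × Int × Int) (hb : bkey (stepA n fw fh s r) = some k) :
    keyLt (candKey n fw fh r) k = false := by
  rw [stepA_bkey] at hb
  by_cases h : updO (bkey s) (candKey n fw fh r) = true
  · rw [if_pos h] at hb
    obtain rfl : candKey n fw fh r = k := by injection hb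
    exact keyLt_irrefl _
  · rw [if_neg h] at hb
    obtain ⟨br, bc, best, bw⟩ := s
    cases best with
    | none => simp [updO, bkey] at h
    | some am =>
      obtain ⟨ba, bm⟩ := am
      simp only [bkey, Option.map_some, Option.some.injEq] at hb
      subst hb
      simp only [updO, bkey, Option.map_some, Bool.not_eq_true] at h
      exact h

lemma stepA_fixed (n fw fh r : Int) (s : Int × Int × Option (Int × Int) × Int)
    (k : Int × Int × Int) (hb : bkey s = some k)
    (hlt : keyLt (candKey n fw fh r) k = false) : stepA n fw fh s r = s := by
  obtain ⟨br, bc, best, bw⟩ := s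
  cases best with
  | none => simp [bkey] at hb
  | some am =>
    obtain ⟨ba, bm⟩ := am
    simp only [bkey, Option.map_some, Option.some.injEq] at hb
    subst hb
    simp only [candKey] at hlt
    simp only [stepA, pycond_eq_keyLt, hlt]
    rfl

lemma staggerLoop_stop (n fw fh r : Int) (best : Int × Int) (bk : Option (Int × Int × Int))
    (h : ¬ r ≤ n) : staggerLoop n fw fh r best bk = best := by
  rw [staggerLoop, dif_neg h]

lemma staggerLoop_step (n fw fh r : Int) (best : Int × Int) (bk : Option (Int × Int × Int))
    (h : r ≤ n) :
    staggerLoop n fw fh r best bk =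
      staggerLoop n fw fh
        (max (if 1 < -(PySem.Int.floordiv (-n) r)
              then PySem.Int.floordiv (n - 1) (-(PySem.Int.floordiv (-n) r) - 1) else n) r + 1)
        (if updO bk (candKey n fw fh r) then (r, -(PySem.Int.floordiv (-n) r)) else best)
        (if updO bk (candKey n fw fh r) then some (candKey n fw fh r) else bk) := by
  cases bk with
  | none => rw [staggerLoop, dif_pos h]; rfl
  | some b => rw [staggerLoop, dif_pos h]; rfl

-- the main induction: folding A's step from row r equals B's block loop from row r
lemma main_lemma (n fw fh : Int) :
    ∀ (k : Nat) (r : Int) (s : Int × Int × Option (Int × Int) × Int),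
      1 ≤ r → (n + 1 - r).toNat ≤ k →
      (let final := (PySem.List.pyRange r (n + 1) 1).foldl (stepA n fw fh) s
       ((final.1, final.2.1) : Int × Int)) = staggerLoop n fw fh r (s.1, s.2.1) (bkey s) := by
  intro k
  induction k with
  | zero =>
    intro r s hr hk
    rw [PySem.List.pyRange_one_eq_nil (by omega), staggerLoop_stop n fw fh r _ _ (by omega)]
    rfl
  | succ k ih =>
    intro r s hr hk
    by_cases hrn : r ≤ n
    · -- split the range: row r, the rest of its block, then the next block start
      have hn : 0 < n := by omega
      set c := -(PySem.Int.floordiv (-n) r) with hc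
      set r_last := (if 1 < c then PySem.Int.floordiv (n - 1) (c - 1) else n) with hrl
      set t := min (max r_last r) n with ht
      have hrt : r ≤ t := by
        have := le_max_right r_last r; omega
      rw [PySem.List.pyRange_one_cons (by omega : r < n + 1),
        PySem.List.pyRange_one_append (r + 1) (t + 1) (n + 1) (by omega) (by omega)]
      simp only [List.foldl_cons, List.foldl_append]
      set s' := stepA n fw fh s r with hs'
      -- after processing row r the carried key is some k' with ¬ candKey r < k'
      obtain ⟨k', hk'⟩ : ∃ k', bkey s' = some k' := by
        rw [hs', stepA_bkey]
        by_cases h : updO (bkey s) (candKey n fw fh r) = true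
        · exact ⟨_, by rw [if_pos h]⟩
        · obtain ⟨br, bc, best, bw⟩ := s
          cases best with
          | none => simp [updO, bkey] at h
          | some am => exact ⟨_, by rw [if_neg h]; rfl⟩
      have hnotlt : keyLt (candKey n fw fh r) k' = false := stepA_key_not_lt n fw fh r s k' hk'
      -- every further row of the same block leaves the state unchanged
      have hfix : (PySem.List.pyRange (r + 1) (t + 1) 1).foldl (stepA n fw fh) s' = s' := by
        apply foldl_fixed_of_mem
        intro x hx
        rw [PySem.List.mem_pyRange_one] at hx
        have hxlast : x ≤ r_last := by
          rcases max_cases r_last r with ⟨he, _⟩ | ⟨he, hle⟩ <;> omega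
        have hcx : -(PySem.Int.floordiv (-n) x) = c :=
          ceil_block (by omega) (by omega) hn hc (by rw [← hrl]; omega)
        have hstrict : keyLt (candKey n fw fh r) (candKey n fw fh x) = true :=
          candKey_strict (by omega) (by omega) hn (by rw [hcx, hc])
        exact stepA_fixed n fw fh x s' k' hk'
          (keyLt_false_of _ _ _ hstrict hnotlt)
      rw [hfix]
      -- the tail ranges agree whether or not the jump target exceeds n
      have htail : PySem.List.pyRange (t + 1) (n + 1) 1
          = PySem.List.pyRange (max r_last r + 1) (n + 1) 1 := by
        by_cases hmn : max r_last r ≤ n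
        · rw [ht, min_eq_left hmn]
        · rw [PySem.List.pyRange_one_eq_nil (by omega),
            PySem.List.pyRange_one_eq_nil (by omega)]
      rw [htail]
      have hmr := le_max_right r_last r
      have hrec := ih (max r_last r + 1) s' (by omega) (by omega)
      simp only at hrec
      rw [hrec]
      -- unfold one step of B's loop; the two states coincide
      rw [staggerLoop_step n fw fh r _ _ hrn]
      rw [stepA_fst n fw fh r s, stepA_bkey n fw fh r s]
    · rw [PySem.List.pyRange_one_eq_nil (by omega), staggerLoop_stop n fw fh r _ _ hrn]
      rfl

-- ===== VERDICT (by name: the statement is the Claim_ definition above) =====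
theorem optimal_stagger_grid_spec : Claim_equal_optimal_stagger_grid := by
  intro n fw fh _
  show optimal_stagger_grid n fw fh = optimal_stagger_grid_alt n fw fh
  rw [optimal_stagger_grid_eq_fold]
  have := main_lemma n fw fh (n + 1 - 1).toNat 1 (1, n, none, n) le_rfl le_rfl
  simpa [optimal_stagger_grid_alt, bkey] using this
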